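-- pv_equiv track=rewrite | github.com/clocksmith/original_performance_takehome | scripts/graph_dp_auto_search.py | _choice_depth_from_name
-- ===== SOURCE A (Python) =====
-- def _choice_depth_from_name(name: str) -> tuple[int | None, int]:
--     # name format: "d=DEPTH,x=X"
--     parts = name.split(",")
--     depth = None
--     x = 0
--     for p in parts:
--         if p.startswith("d="):
--             val = p[2:]
--             depth = None if val == "none" else int(val)
--         elif p.startswith("x="):
--             x = int(p[2:])
--     return depth, x
-- ===== SOURCE B (Python) =====
-- def _choice_depth_from_name(name: str) -> tuple[int | None, int]:
--     # Build a field dict from the comma-separated "key=value" parts (last wins),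
--     # then answer both questions by keyed lookup.
--     fields = dict(p.split("=", 1) for p in name.split(",") if "=" in p)
--     dv = fields.get("d")
--     depth = None if dv is None or dv == "none" else int(dv)
--     x = int(fields["x"]) if "x" in fields else 0
--     return depth, x
-- ===== Notes on version B (the rewrite author's own statement) =====
-- stated objective: idiomatic
-- what changed: Replaces A's scan-and-branch loop threading depth/x state with a one-shot dict built from the '='-split parts followed by keyed lookups for 'd' and 'x'.
import Mathlib
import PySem

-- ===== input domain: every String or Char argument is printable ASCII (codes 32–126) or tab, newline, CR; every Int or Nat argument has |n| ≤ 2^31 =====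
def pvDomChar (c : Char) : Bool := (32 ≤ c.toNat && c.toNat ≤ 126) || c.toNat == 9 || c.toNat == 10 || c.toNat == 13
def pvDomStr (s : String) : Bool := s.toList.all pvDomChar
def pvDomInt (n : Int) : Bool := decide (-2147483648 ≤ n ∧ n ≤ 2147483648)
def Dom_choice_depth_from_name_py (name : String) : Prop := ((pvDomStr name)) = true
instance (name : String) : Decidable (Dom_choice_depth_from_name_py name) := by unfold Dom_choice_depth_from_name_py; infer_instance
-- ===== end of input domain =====

-- B replaces A's scan-and-branch loop by a dict built once from the '='-split parts plus keyed lookups (idiomatic, same cost).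

-- ===== PORT A =====
-- one iteration of A's for-loop over the comma-parts; state = (depth, x).
-- PySem.Int.ofStr? = none is where Python's int() raises ValueError — those inputs are excluded by Pre_ below (.getD 0 is never the value claimed).
def pvStepA (st : Option Int × Int) (p : String) : Option Int × Int :=
  if PySem.Str.startswith p "d=" then
    let val := PySem.Str.slice p (some 2)
    (if val == "none" then none else some ((PySem.Int.ofStr? val).getD 0), st.2)
  else if PySem.Str.startswith p "x=" then
    (st.1, (PySem.Int.ofStr? (PySem.Str.slice p (some 2))).getD 0)
  else st

def choice_depth_from_name_py (name : String) : Option Int × Int :=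
  -- name.split(","): split? is none only for an empty separator, so .getD [] is exact here
  let parts := (PySem.Str.split? name ",").getD []
  parts.foldl pvStepA (none, 0)

-- ===== PORT B =====
-- one iteration of B's dict-building pass: if "=" in p, insert p.split("=", 1) (last wins)
def pvStepB (d : PySem.Dict String String) (p : String) : PySem.Dict String String :=
  if PySem.Str.isIn "=" p then
    -- p.split("=", 1): splitMax? is none only for an empty separator; with "=" in p it is exactly [k, v]
    match (PySem.Str.splitMax? p "=" 1).getD [] with
    | [k, v] => d.insert k v
    | _ => d
  else d

-- B's keyed lookups: depth from fields.get("d"), x from fields["x"] if present else 0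
def pvDecodeB (d : PySem.Dict String String) : Option Int × Int :=
  (match d.get? "d" with
   | none => none
   | some v => if v == "none" then none else some ((PySem.Int.ofStr? v).getD 0),
   match d.get? "x" with
   | none => 0
   | some v => (PySem.Int.ofStr? v).getD 0)

def choice_depth_from_name_py_alt (name : String) : Option Int × Int :=
  let parts := (PySem.Str.split? name ",").getD []
  pvDecodeB (parts.foldl pvStepB PySem.Dict.empty)

-- ===== PRECONDITION & SPEC =====
-- Pre_ excludes exactly the inputs where Python A raises ValueError: some "d=" part whose
-- value is neither "none" nor an int literal, or some "x=" part whose value is not an int literal.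
def Pre_choice_depth_from_name_py (name : String) : Prop :=
  ∀ p ∈ (PySem.Str.split? name ",").getD [],
    (PySem.Str.startswith p "d=" = true →
      (PySem.Str.slice p (some 2) = "none" ∨ (PySem.Int.ofStr? (PySem.Str.slice p (some 2))).isSome = true)) ∧
    (PySem.Str.startswith p "x=" = true →
      (PySem.Int.ofStr? (PySem.Str.slice p (some 2))).isSome = true)
instance (name : String) : Decidable (Pre_choice_depth_from_name_py name) := by
  unfold Pre_choice_depth_from_name_py; infer_instance

def pvWitness_choice_depth_from_name_py : String := "d=3,x=7"

def Spec_choice_depth_from_name_py (name : String) (out : Option Int × Int) : Prop :=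
  out = choice_depth_from_name_py_alt name
instance (name : String) (out : Option Int × Int) : Decidable (Spec_choice_depth_from_name_py name out) := by
  unfold Spec_choice_depth_from_name_py; infer_instance

-- ===== CLAIM (what is proved, stated in full; the proofs are below) =====
def Claim_equal_choice_depth_from_name_py : Prop := ∀ (name : String), Dom_choice_depth_from_name_py name → Pre_choice_depth_from_name_py name → Spec_choice_depth_from_name_py name (choice_depth_from_name_py name)

-- ===== LEMMAS AND PROOFS =====

-- splitOnMax.go once maxsplit has reached 0: the rest is one piece
lemma pvGoZero (fuel : Nat) (l cur : List Char) (acc : List (List Char)) :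
    PySem.Chars.splitOnMax.go ['='] fuel 0 l cur acc = ((cur.reverse ++ l) :: acc).reverse := by
  cases fuel with
  | zero => simp [PySem.Chars.splitOnMax.go]
  | succ f => cases l <;> simp [PySem.Chars.splitOnMax.go]

-- splitOnMax.go with maxsplit 1 on a list containing '=': split at the first '='
lemma pvGoOne (fuel : Nat) (l cur : List Char) (acc : List (List Char))
    (hf : l.length < fuel) (hm : '=' ∈ l) :
    PySem.Chars.splitOnMax.go ['='] fuel 1 l cur acc =
      acc.reverse ++ [cur.reverse ++ l.takeWhile (· != '='), (l.dropWhile (· != '=')).tail] := by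
  induction fuel generalizing l cur acc with
  | zero => omega
  | succ f ih =>
    cases l with
    | nil => simp at hm
    | cons c rest =>
      by_cases hc : c = '='
      · subst hc
        simp [PySem.Chars.splitOnMax.go, List.isPrefixOf, pvGoZero]
      · have hm' : '=' ∈ rest := by
          cases hm with
          | head => exact absurd rfl hc
          | tail _ h => exact h
        have hf' : rest.length < f := by simp at hf; omega
        simp [PySem.Chars.splitOnMax.go, List.isPrefixOf, Ne.symm hc, hc,
          ih rest (c :: cur) acc hf' hm']

-- s.split("=", 1) on a string containing '='
lemma pvSplitMaxEq (l : List Char) (hm : '=' ∈ l) :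
    PySem.Chars.splitOnMax l ['='] 1 = [l.takeWhile (· != '='), (l.dropWhile (· != '=')).tail] := by
  have h1 : ¬ ((1 : Int) < 0) := by norm_num
  simp only [PySem.Chars.splitOnMax, h1, if_false]
  have := pvGoOne (l.length + 1) l [] [] (by omega) hm
  simpa using this

-- decomposition of a list containing '=' at its first '='
lemma pvDecomp (l : List Char) (hm : '=' ∈ l) :
    l = l.takeWhile (· != '=') ++ '=' :: (l.dropWhile (· != '=')).tail ∧
      '=' ∉ l.takeWhile (· != '=') := by
  have hne : l.dropWhile (· != '=') ≠ [] := by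
    intro h
    have := (List.dropWhile_eq_nil_iff).1 h '=' hm
    simp at this
  have hhead : (· != '=') ((l.dropWhile (· != '=')).head hne) = false :=
    List.head_dropWhile_not _ hne
  have hh : (l.dropWhile (· != '=')).head hne = '=' := by simpa using hhead
  constructor
  · conv_lhs => rw [← List.takeWhile_append_dropWhile (p := (· != '=')) (l := l)]
    congr 1
    have hct := (List.cons_head_tail hne).symm
    rw [hh] at hct
    exact hct
  · intro hmem
    have := List.mem_takeWhile_imp hmem
    simp at this

-- [c, '='] is a prefix of a ++ '=' :: b (with '=' ∉ a) exactly when a = [c]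
lemma pvPrefixIff (c : Char) (hc : c ≠ '=') (a b : List Char) (ha : '=' ∉ a) :
    [c, '='] <+: (a ++ '=' :: b) ↔ a = [c] := by
  cases a with
  | nil => simp [List.cons_prefix_cons, hc]
  | cons x a' =>
    cases a' with
    | nil => simp [List.cons_prefix_cons, eq_comm]
    | cons y a'' =>
      have hy : ('=' : Char) ≠ y := by
        intro h; exact ha (by simp [← h])
      simp [List.cons_prefix_cons, hy]

-- the per-part step: A's branch update equals B's dict insert, seen through pvDecodeB
lemma pvStepEq (d : PySem.Dict String String) (p : String) :
    pvStepA (pvDecodeB d) p = pvDecodeB (pvStepB d p) := by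
  by_cases hm : '=' ∈ p.toList
  · -- p contains '=': B inserts (key, value); A updates iff the key is "d" or "x"
    obtain ⟨hdec, hnin⟩ := pvDecomp p.toList hm
    set a := p.toList.takeWhile (· != '=') with ha
    set b := (p.toList.dropWhile (· != '=')).tail with hb
    have hisIn : PySem.Chars.isIn ['='] p.toList = true :=
      (PySem.Chars.isIn_iff_infix _ _).2 ((List.singleton_infix_iff '=' p.toList).2 hm)
    have hsplit : (PySem.Str.splitMax? p "=" 1).getD [] = [String.ofList a, String.ofList b] := by
      simp only [PySem.Str.splitMax?, PySem.Chars.splitMax?]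
      rw [show ("=" : String).toList = ['='] from rfl]
      simp [pvSplitMaxEq p.toList hm, ← ha, ← hb]
    have hB : pvStepB d p = d.insert (String.ofList a) (String.ofList b) := by
      simp [pvStepB, hisIn, hsplit]
    have hsd : PySem.Chars.startswith p.toList ['d', '='] = true ↔ a = ['d'] := by
      simp only [PySem.Chars.startswith, List.isPrefixOf_iff_prefix]
      rw [hdec]
      exact pvPrefixIff 'd' (by decide) a b hnin
    have hsx : PySem.Chars.startswith p.toList ['x', '='] = true ↔ a = ['x'] := by
      simp only [PySem.Chars.startswith, List.isPrefixOf_iff_prefix]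
      rw [hdec]
      exact pvPrefixIff 'x' (by decide) a b hnin
    by_cases had : a = ['d']
    · have h1 : PySem.Chars.startswith p.toList ['d', '='] = true := hsd.2 had
      have hkey : String.ofList a = "d" := by rw [had]
      have hval : PySem.Str.slice p (some 2) = String.ofList b := by
        simp only [PySem.Str.slice, PySem.Chars.slice_eq_listSlice,
          PySem.List.slice_from _ (by norm_num : (0:Int) ≤ 2)]
        congr 1
        rw [hdec, had]
        rfl
      have hxd : ("x" : String) ≠ "d" := by decide
      rw [hB, hkey]
      simp [pvStepA, pvDecodeB, h1, hval, PySem.Dict.get?_insert_self,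
        PySem.Dict.get?_insert_of_ne d _ hxd]
    · by_cases hax : a = ['x']
      · have h1 : ¬ PySem.Chars.startswith p.toList ['d', '='] = true := fun h => had (hsd.1 h)
        have h2 : PySem.Chars.startswith p.toList ['x', '='] = true := hsx.2 hax
        have hkey : String.ofList a = "x" := by rw [hax]
        have hval : PySem.Str.slice p (some 2) = String.ofList b := by
          simp only [PySem.Str.slice, PySem.Chars.slice_eq_listSlice,
            PySem.List.slice_from _ (by norm_num : (0:Int) ≤ 2)]
          congr 1
          rw [hdec, hax]
          rfl
        have hdx : ("d" : String) ≠ "x" := by decide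
        rw [hB, hkey]
        simp [pvStepA, pvDecodeB, h1, h2, hval, PySem.Dict.get?_insert_self,
          PySem.Dict.get?_insert_of_ne d _ hdx]
      · -- other key: neither side changes anything observable
        have h1 : ¬ PySem.Chars.startswith p.toList ['d', '='] = true := fun h => had (hsd.1 h)
        have h2 : ¬ PySem.Chars.startswith p.toList ['x', '='] = true := fun h => hax (hsx.1 h)
        have hkd : ("d" : String) ≠ String.ofList a := by
          intro h; exact had (by simpa [String.toList_ofList] using congrArg String.toList h.symm)
        have hkx : ("x" : String) ≠ String.ofList a := by
          intro h; exact hax (by simpa [String.toList_ofList] using congrArg String.toList h.symm)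
        rw [hB]
        simp [pvStepA, pvDecodeB, h1, h2,
          PySem.Dict.get?_insert_of_ne d _ hkd, PySem.Dict.get?_insert_of_ne d _ hkx]
  · -- no '=': A's startswith tests are false, B inserts nothing
    have hisIn : PySem.Chars.isIn ['='] p.toList = false :=
      (PySem.Chars.isIn_eq_false_iff _ _).2
        (fun h => hm ((List.singleton_infix_iff '=' p.toList).1 h))
    have hsd : ¬ ([('d' : Char), '='] <+: p.toList) := fun h => hm (h.mem (by simp))
    have hsx : ¬ ([('x' : Char), '='] <+: p.toList) := fun h => hm (h.mem (by simp))
    simp [pvStepA, pvStepB, PySem.Chars.startswith, List.isPrefixOf_iff_prefix,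
      hsd, hsx, hisIn]

-- the whole loop: folding A's step from B's decode of d equals decoding B's folded dict
lemma pvFoldEq (ps : List String) (d : PySem.Dict String String) :
    ps.foldl pvStepA (pvDecodeB d) = pvDecodeB (ps.foldl pvStepB d) := by
  induction ps generalizing d with
  | nil => rfl
  | cons p ps ih => rw [List.foldl_cons, List.foldl_cons, pvStepEq, ih]

-- ===== VERDICT (by name: the statement is the Claim_ definition above) =====
theorem choice_depth_from_name_py_spec : Claim_equal_choice_depth_from_name_py := by
  intro name _ _
  unfold Spec_choice_depth_from_name_py choice_depth_from_name_py choice_depth_from_name_py_alt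
  have h0 : pvDecodeB PySem.Dict.empty = (none, 0) := rfl
  rw [← h0, pvFoldEq]
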